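-- pv_equiv track=rewrite | github.com/yinnie/python-plays | word_play.py | anag_in_list
-- ===== SOURCE A (Python) =====
-- def anag_in_list ( col ) :
--     l = []
--     dic = {}
--     for word in col:
--         word_sorted = ''.join(sorted(word))
--         if word_sorted in dic:
--             return word
--         dic[word_sorted] = word
-- ===== SOURCE B (Python) =====
-- def anag_in_list(col):
--     words = list(col)
--     for i in range(len(words)):
--         key_i = ''.join(sorted(words[i]))
--         for j in range(i):
--             if ''.join(sorted(words[j])) == key_i:
--                 return words[i]
--     return None
-- ===== Notes on version B (the rewrite author's own statement) =====
-- stated objective: alternative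
-- what changed: Replaced the sorted-key dictionary with a naive pairwise scan: for each word, re-scan all earlier words comparing sorted-character keys, returning the current word on the first earlier match; no dict is maintained.
import Mathlib
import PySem

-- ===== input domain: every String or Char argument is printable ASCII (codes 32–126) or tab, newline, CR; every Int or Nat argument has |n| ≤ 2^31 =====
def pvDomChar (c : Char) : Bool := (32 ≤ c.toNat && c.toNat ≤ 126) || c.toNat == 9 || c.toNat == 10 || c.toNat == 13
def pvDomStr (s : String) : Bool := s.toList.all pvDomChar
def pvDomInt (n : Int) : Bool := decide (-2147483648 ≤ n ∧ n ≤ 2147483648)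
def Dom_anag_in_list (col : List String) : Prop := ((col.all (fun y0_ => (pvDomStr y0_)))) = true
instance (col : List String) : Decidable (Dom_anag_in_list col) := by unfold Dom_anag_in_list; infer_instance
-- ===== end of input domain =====

-- B replaces A's sorted-key dictionary with a naive rescan of all earlier words (alternative decomposition, not faster).

-- ''.join(sorted(word))
def pvKey (w : String) : String := String.ofList (PySem.List.sorted w.toList (fun c => c) false)

-- ===== PORT A =====
def anagLoopA : List String → PySem.Dict String String → Option String
  | [], _ => none
  | w :: ws, dic =>
    let k := pvKey w
    if dic.contains k then some w
    else anagLoopA ws (dic.insert k w)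

def anag_in_list (col : List String) : Option String :=
  anagLoopA col PySem.Dict.empty

-- ===== PORT B =====
-- prev = words[:i]; the inner 'for j in range(i)' scan is prev.any
def anagLoopB : List String → List String → Option String
  | _, [] => none
  | prev, w :: ws =>
    if prev.any (fun p => pvKey p == pvKey w) then some w
    else anagLoopB (prev ++ [w]) ws

def anag_in_list_alt (col : List String) : Option String :=
  anagLoopB [] col

-- ===== PRECONDITION & SPEC =====
def Spec_anag_in_list (col : List String) (out : Option String) : Prop := out = anag_in_list_alt col
instance (col : List String) (out : Option String) : Decidable (Spec_anag_in_list col out) := by unfold Spec_anag_in_list; infer_instance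

-- ===== CLAIM (what is proved, stated in full; the proofs are below) =====
def Claim_equal_anag_in_list : Prop := ∀ (col : List String), Dom_anag_in_list col → Spec_anag_in_list col (anag_in_list col)

-- ===== LEMMAS AND PROOFS =====
lemma anagLoop_eq (rest : List String) : ∀ (prev : List String) (dic : PySem.Dict String String),
    (∀ k, dic.contains k = prev.any (fun p => pvKey p == k)) →
    anagLoopA rest dic = anagLoopB prev rest := by
  induction rest with
  | nil => intro prev dic _; simp [anagLoopA, anagLoopB]
  | cons w ws ih =>
    intro prev dic h
    simp only [anagLoopA, anagLoopB, h (pvKey w)]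
    by_cases hc : prev.any (fun p => pvKey p == pvKey w)
    · simp [hc]
    · simp only [hc, if_false]
      apply ih
      intro k
      simp [PySem.Dict.contains_insert, h k, Bool.or_comm, BEq.comm]

-- ===== VERDICT (by name: the statement is the Claim_ definition above) =====
theorem anag_in_list_spec : Claim_equal_anag_in_list := by
  intro col _
  unfold Spec_anag_in_list anag_in_list anag_in_list_alt
  exact anagLoop_eq col [] PySem.Dict.empty (fun k => by simp [PySem.Dict.contains_empty])
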